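-- pv_equiv track=rewrite | github.com/Artasel/Zadachi_Python | Home2.py | nods_1
-- ===== SOURCE A (Python) =====
-- import math
--
-- def nods_1(num_1: int, num_2: int) -> str:
--     while True:
--         nod = math.gcd(num_1, num_2)
--         num_1 = num_1 // nod
--         num_2 = num_2 // nod
--         if nod == 1:
--             break
--     return str(num_1)
-- ===== SOURCE B (Python) =====
-- import math
--
-- def nods_1(num_1: int, num_2: int) -> str:
--     # the loop in A divides by the gcd once (leaving the numbers coprime) and breaks:
--     # the net effect is a single floor-division by the original gcd.
--     return str(num_1 // math.gcd(num_1, num_2))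
-- ===== Notes on version B (the rewrite author's own statement) =====
-- stated objective: simpler
-- what changed: Replaces the while-loop (divide both numbers by their gcd, repeat until gcd is 1) with the closed form str(num_1 // gcd(num_1, num_2)), since the first pass leaves the numbers coprime.
-- outside the precondition, e.g. on nods_1(0, 0): A raises ZeroDivisionError, B raises ZeroDivisionError
import Mathlib
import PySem

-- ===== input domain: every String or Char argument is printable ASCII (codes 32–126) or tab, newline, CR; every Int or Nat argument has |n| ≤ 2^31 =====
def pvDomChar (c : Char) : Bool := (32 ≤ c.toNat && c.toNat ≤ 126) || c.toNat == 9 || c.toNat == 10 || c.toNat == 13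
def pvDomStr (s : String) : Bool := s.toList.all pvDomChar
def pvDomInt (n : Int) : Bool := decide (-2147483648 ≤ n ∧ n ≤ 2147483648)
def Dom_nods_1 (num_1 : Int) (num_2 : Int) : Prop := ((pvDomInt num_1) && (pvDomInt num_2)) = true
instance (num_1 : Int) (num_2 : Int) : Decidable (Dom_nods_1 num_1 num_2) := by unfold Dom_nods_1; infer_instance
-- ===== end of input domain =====

-- B replaces A's while-loop with the closed form str(num_1 // gcd(num_1, num_2)); objective: simpler.

-- ===== PORT A =====
-- Fact used only for the loop's termination: after one division both numbers are coprime.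
theorem gcd_after_div (num_1 num_2 : Int) (hg : 0 < Int.gcd num_1 num_2) :
    Int.gcd (PySem.Int.floordiv num_1 (Int.gcd num_1 num_2 : Int))
      (PySem.Int.floordiv num_2 (Int.gcd num_1 num_2 : Int)) = 1 := by
  have hpos : (0 : Int) < (Int.gcd num_1 num_2 : Int) := by exact_mod_cast hg
  rw [PySem.Int.floordiv_eq_ediv_of_pos hpos, PySem.Int.floordiv_eq_ediv_of_pos hpos]
  have a1 : (num_1 / (Int.gcd num_1 num_2 : Int)).natAbs = num_1.natAbs / Int.gcd num_1 num_2 := by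
    simpa using Int.natAbs_ediv_of_dvd (Int.gcd_dvd_left num_1 num_2)
  have a2 : (num_2 / (Int.gcd num_1 num_2 : Int)).natAbs = num_2.natAbs / Int.gcd num_1 num_2 := by
    simpa using Int.natAbs_ediv_of_dvd (Int.gcd_dvd_right num_1 num_2)
  show Nat.gcd (num_1 / (Int.gcd num_1 num_2 : Int)).natAbs
      (num_2 / (Int.gcd num_1 num_2 : Int)).natAbs = 1
  rw [a1, a2]
  exact Nat.coprime_div_gcd_div_gcd hg

-- 'while True: nod = gcd(num_1, num_2); num_1 //= nod; num_2 //= nod; if nod == 1: break'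
-- as structural recursion on the gcd, which strictly decreases (to 1) whenever the loop
-- repeats. The 'nod = 0' branch is where Python raises ZeroDivisionError (excluded by
-- Pre_); it only makes the recursion total.
def nods_1_loop (num_1 : Int) (num_2 : Int) : String :=
  let nod : Int := (Int.gcd num_1 num_2 : Int)
  if hz : nod = 0 then ""
  else
    let n1 := PySem.Int.floordiv num_1 nod
    let n2 := PySem.Int.floordiv num_2 nod
    if nod = 1 then PySem.Int.toStr n1
    else nods_1_loop n1 n2
termination_by Int.gcd num_1 num_2
decreasing_by
  rename_i h1
  have hg : 0 < Int.gcd num_1 num_2 := by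
    rcases Nat.eq_zero_or_pos (Int.gcd num_1 num_2) with h | h
    · exact absurd (show ((Int.gcd num_1 num_2 : Nat) : Int) = 0 by exact_mod_cast h) hz
    · exact h
  have hne : Int.gcd num_1 num_2 ≠ 1 := fun e =>
    h1 (show ((Int.gcd num_1 num_2 : Nat) : Int) = 1 by exact_mod_cast e)
  have hco := gcd_after_div num_1 num_2 hg
  omega

def nods_1 (num_1 : Int) (num_2 : Int) : String := nods_1_loop num_1 num_2

-- ===== PORT B =====
def nods_1_alt (num_1 : Int) (num_2 : Int) : String :=
  PySem.Int.toStr (PySem.Int.floordiv num_1 (Int.gcd num_1 num_2 : Int))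

-- ===== PRECONDITION & SPEC =====
-- Pre_ excludes exactly num_1 = num_2 = 0, where A raises ZeroDivisionError (gcd is 0).
def Pre_nods_1 (num_1 : Int) (num_2 : Int) : Prop := ¬ (num_1 = 0 ∧ num_2 = 0)
instance (num_1 : Int) (num_2 : Int) : Decidable (Pre_nods_1 num_1 num_2) := by unfold Pre_nods_1; infer_instance
def pvWitness_nods_1 : Int × Int := (12, 18)

def Spec_nods_1 (num_1 : Int) (num_2 : Int) (out : String) : Prop := out = nods_1_alt num_1 num_2
instance (num_1 : Int) (num_2 : Int) (out : String) : Decidable (Spec_nods_1 num_1 num_2 out) := by unfold Spec_nods_1; infer_instance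

-- ===== CLAIM (what is proved, stated in full; the proofs are below) =====
def Claim_equal_nods_1 : Prop := ∀ (num_1 : Int) (num_2 : Int), Dom_nods_1 num_1 num_2 → Pre_nods_1 num_1 num_2 → Spec_nods_1 num_1 num_2 (nods_1 num_1 num_2)

-- ===== LEMMAS AND PROOFS =====

-- ===== VERDICT (by name: the statement is the Claim_ definition above) =====
theorem gcd_pos_of_pre (num_1 num_2 : Int) (hp : Pre_nods_1 num_1 num_2) :
    0 < Int.gcd num_1 num_2 := by
  rcases Nat.eq_zero_or_pos (Int.gcd num_1 num_2) with h | h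
  · exact absurd (Int.gcd_eq_zero_iff.mp h) hp
  · exact h

theorem nods_1_spec : Claim_equal_nods_1 := by
  intro num_1 num_2 _ hp
  unfold Spec_nods_1 nods_1 nods_1_alt
  have hg := gcd_pos_of_pre num_1 num_2 hp
  have hpos : (0 : Int) < (Int.gcd num_1 num_2 : Int) := by exact_mod_cast hg
  have hz : (Int.gcd num_1 num_2 : Int) ≠ 0 := hpos.ne'
  rw [nods_1_loop]
  simp only [hz, dite_false]
  by_cases h1 : (Int.gcd num_1 num_2 : Int) = 1
  · simp [h1]
  · simp only [h1, if_false]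
    have hco := gcd_after_div num_1 num_2 hg
    have hco' : ((Int.gcd (PySem.Int.floordiv num_1 (Int.gcd num_1 num_2 : Int))
        (PySem.Int.floordiv num_2 (Int.gcd num_1 num_2 : Int)) : Nat) : Int) = 1 := by
      exact_mod_cast hco
    rw [nods_1_loop]
    simp [hco']
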